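-- pv_equiv track=rewrite | github.com/NarayanabhatlaMahesh/EvoGymEnvGen | TraverseLab/Experiments/Utils/json_export.py | object_to_rect
-- ===== SOURCE A (Python) =====
-- def object_to_rect(obj, world_width):
--     """
--     Converts an EvoGym object format back into a rect dictionary and its metadata.
--     """
--     indices = obj["indices"]
--     if not indices:
--         return None
--
--     # 1. Convert 1D indices back to 2D coordinates
--     coords = []
--     for idx in indices:
--         x = idx % world_width
--         y = idx // world_width
--         coords.append((x, y))
--
--     # 2. Find the bounding box (min/max x and y)
--     min_x = min(c[0] for c in coords)
--     max_x = max(c[0] for c in coords)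
--     min_y = min(c[1] for c in coords)
--     max_y = max(c[1] for c in coords)
--
--     # 3. Reconstruct the rect dictionary
--     rect = {
--         "x": min_x,
--         "y": min_y,
--         "w": (max_x - min_x) + 1,
--         "h": (max_y - min_y) + 1
--     }
--
--     return rect
-- ===== SOURCE B (Python) =====
-- def object_to_rect(obj, world_width):
--     """
--     Converts an EvoGym object format back into a rect dictionary and its metadata.
--     Single pass: no coords list, running min/max extremes updated in one loop.
--     """
--     indices = obj["indices"]
--     if not indices:
--         return None
--
--     min_x = max_x = indices[0] % world_width
--     min_y = max_y = indices[0] // world_width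
--     for idx in indices[1:]:
--         x = idx % world_width
--         y = idx // world_width
--         if x < min_x:
--             min_x = x
--         if x > max_x:
--             max_x = x
--         if y < min_y:
--             min_y = y
--         if y > max_y:
--             max_y = y
--
--     return {"x": min_x, "y": min_y, "w": (max_x - min_x) + 1, "h": (max_y - min_y) + 1}
-- ===== Notes on version B (the rewrite author's own statement) =====
-- stated objective: faster
-- what changed: Replaces the intermediate coords list and the four separate generator min/max passes with a single fused loop over the indices that maintains running min/max for x and y, seeded from the first index.
import Mathlib
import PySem

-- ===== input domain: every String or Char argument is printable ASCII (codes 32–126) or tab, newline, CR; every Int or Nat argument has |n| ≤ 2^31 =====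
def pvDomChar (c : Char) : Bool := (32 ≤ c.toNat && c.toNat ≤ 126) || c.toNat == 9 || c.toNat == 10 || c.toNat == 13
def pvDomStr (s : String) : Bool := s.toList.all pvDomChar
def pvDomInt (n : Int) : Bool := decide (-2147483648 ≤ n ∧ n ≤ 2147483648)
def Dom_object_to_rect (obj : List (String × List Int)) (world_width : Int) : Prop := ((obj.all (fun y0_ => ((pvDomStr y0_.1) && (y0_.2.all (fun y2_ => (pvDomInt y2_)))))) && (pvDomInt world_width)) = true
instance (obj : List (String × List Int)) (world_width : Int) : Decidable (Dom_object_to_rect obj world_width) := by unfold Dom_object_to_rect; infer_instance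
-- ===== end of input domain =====

-- B fuses A's coords list and four generator min/max passes into one running-extremes loop (constant-factor faster).


-- ===== PORT A =====
-- obj["indices"]: first-match association-list lookup; KeyError (lookup fails) is excluded by Pre_.
-- The final wildcard branch (min/max of an empty generator, ValueError) is unreachable: coords is built from a nonempty indices list.
def object_to_rect (obj : List (String × List Int)) (world_width : Int) : Option (List (String × Int)) :=
  match obj.find? (fun p => p.1 == "indices") with
  | none => none
  | some (_, indices) =>
    match indices with
    | [] => none
    | i0 :: rest =>
      let coords := (i0 :: rest).map (fun idx => (PySem.Int.mod idx world_width, PySem.Int.floordiv idx world_width))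
      let xs := coords.map Prod.fst
      let ys := coords.map Prod.snd
      match PySem.List.min? xs (fun v => v), PySem.List.max? xs (fun v => v),
            PySem.List.min? ys (fun v => v), PySem.List.max? ys (fun v => v) with
      | some min_x, some max_x, some min_y, some max_y =>
        some [("x", min_x), ("y", min_y), ("w", (max_x - min_x) + 1), ("h", (max_y - min_y) + 1)]
      | _, _, _, _ => none

-- ===== PORT B =====
-- single fused loop: state (min_x, max_x, min_y, max_y) seeded from indices[0], folded over indices[1:]
def object_to_rect_alt (obj : List (String × List Int)) (world_width : Int) : Option (List (String × Int)) :=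
  match obj.find? (fun p => p.1 == "indices") with
  | none => none
  | some (_, indices) =>
    match indices with
    | [] => none
    | i0 :: rest =>
      let x0 := PySem.Int.mod i0 world_width
      let y0 := PySem.Int.floordiv i0 world_width
      let s := rest.foldl (fun (st : Int × Int × Int × Int) idx =>
        let x := PySem.Int.mod idx world_width
        let y := PySem.Int.floordiv idx world_width
        let mnx := if x < st.1 then x else st.1
        let mxx := if x > st.2.1 then x else st.2.1
        let mny := if y < st.2.2.1 then y else st.2.2.1
        let mxy := if y > st.2.2.2 then y else st.2.2.2
        (mnx, mxx, mny, mxy)) (x0, x0, y0, y0)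
      some [("x", s.1), ("y", s.2.2.1), ("w", (s.2.1 - s.1) + 1), ("h", (s.2.2.2 - s.2.2.1) + 1)]

-- ===== PRECONDITION & SPEC =====
-- Pre_ excludes exactly the inputs where A raises: a KeyError when "indices" is absent, and a
-- ZeroDivisionError when world_width = 0 and the indices list is nonempty (so % is actually evaluated).
def Pre_object_to_rect (obj : List (String × List Int)) (world_width : Int) : Prop :=
  ((obj.find? (fun p => p.1 == "indices")).elim false
    (fun p => p.2.isEmpty || world_width != 0)) = true
instance (obj : List (String × List Int)) (world_width : Int) : Decidable (Pre_object_to_rect obj world_width) := by unfold Pre_object_to_rect; infer_instance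
def pvWitness_object_to_rect : (List (String × List Int)) × Int := ([("indices", [5, 1, 12])], 4)
def Spec_object_to_rect (obj : List (String × List Int)) (world_width : Int) (out : Option (List (String × Int))) : Prop := out = object_to_rect_alt obj world_width
instance (obj : List (String × List Int)) (world_width : Int) (out : Option (List (String × Int))) : Decidable (Spec_object_to_rect obj world_width out) := by unfold Spec_object_to_rect; infer_instance

-- ===== CLAIM (what is proved, stated in full; the proofs are below) =====
def Claim_equal_object_to_rect : Prop := ∀ (obj : List (String × List Int)) (world_width : Int), Dom_object_to_rect obj world_width → Pre_object_to_rect obj world_width → Spec_object_to_rect obj world_width (object_to_rect obj world_width)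

-- ===== LEMMAS AND PROOFS =====

-- B's fused fold computes the four componentwise running min/max folds over the mapped x/y values.
theorem fused_fold_eq (fx fy : Int → Int) (l : List Int) (a b c d : Int) :
    l.foldl (fun (st : Int × Int × Int × Int) idx =>
        let x := fx idx
        let y := fy idx
        let mnx := if x < st.1 then x else st.1
        let mxx := if x > st.2.1 then x else st.2.1
        let mny := if y < st.2.2.1 then y else st.2.2.1
        let mxy := if y > st.2.2.2 then y else st.2.2.2
        (mnx, mxx, mny, mxy)) (a, b, c, d)
      = ((l.map fx).foldl min a, (l.map fx).foldl max b,
         (l.map fy).foldl min c, (l.map fy).foldl max d) := by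
  induction l generalizing a b c d with
  | nil => rfl
  | cons h t ih =>
    simp only [List.foldl_cons, List.map_cons, ih]
    congr 1 <;> [skip; congr 1] <;> [skip; skip; congr 1]
    all_goals
      congr 1
      split <;> omega

-- ===== VERDICT (by name: the statement is the Claim_ definition above) =====
theorem object_to_rect_spec : Claim_equal_object_to_rect := by
  intro obj ww _ _
  unfold Spec_object_to_rect object_to_rect object_to_rect_alt
  cases hfind : obj.find? (fun p => p.1 == "indices") with
  | none => rfl
  | some p =>
    obtain ⟨k, indices⟩ := p
    cases indices with
    | nil => rfl
    | cons i0 rest =>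
      simp only [List.map_cons, PySem.List.min?_id_cons, PySem.List.max?_id_cons,
        List.map_map, fused_fold_eq]
      rfl
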